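-- pv_equiv track=rewrite | github.com/habibhamdoun/programmable-matter-project | evolutionary_trainer.py | _count_connected_pairs
-- ===== SOURCE A (Python) =====
-- def _count_connected_pairs(positions):
--     """
--     Count the number of connected pairs in the positions.
--
--     Args:
--         positions (dict): Dictionary mapping cell_id to position
--
--     Returns:
--         int: Number of connected pairs
--     """
--     if len(positions) <= 1:
--         return 0
--
--     # Count adjacent pairs
--     connected_pairs = 0
--     cell_ids = list(positions.keys())
--
--     for i, cell_id1 in enumerate(cell_ids):
--         pos1 = positions[cell_id1]
--         for cell_id2 in cell_ids[i+1:]:  # Only check each pair once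
--             pos2 = positions[cell_id2]
--
--             # Check if cells are adjacent (Manhattan distance = 1)
--             manhattan_dist = abs(pos1[0] - pos2[0]) + abs(pos1[1] - pos2[1])
--             if manhattan_dist == 1:
--                 connected_pairs += 1
--
--     return connected_pairs
-- ===== SOURCE B (Python) =====
-- def _count_connected_pairs(positions):
--     """Count pairs of cells at Manhattan distance 1 in O(n) via a position-count hash."""
--     occ = {}
--     for pos in positions.values():
--         occ[pos] = occ.get(pos, 0) + 1
--     total = 0
--     for pos in positions.values():
--         x, y = pos[0], pos[1]
--         # each adjacent pair is counted exactly once, by the cell whose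
--         # neighbour lies to the +x or +y side
--         total += occ.get((x + 1, y), 0) + occ.get((x, y + 1), 0)
--     return total
-- ===== Notes on version B (the rewrite author's own statement) =====
-- stated objective: faster
-- what changed: Replaced the all-pairs double loop with a hash map from position to multiplicity: each cell adds the counts of its +x and +y neighbour positions, so every distance-1 pair is counted exactly once in a single pass.
import Mathlib
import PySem

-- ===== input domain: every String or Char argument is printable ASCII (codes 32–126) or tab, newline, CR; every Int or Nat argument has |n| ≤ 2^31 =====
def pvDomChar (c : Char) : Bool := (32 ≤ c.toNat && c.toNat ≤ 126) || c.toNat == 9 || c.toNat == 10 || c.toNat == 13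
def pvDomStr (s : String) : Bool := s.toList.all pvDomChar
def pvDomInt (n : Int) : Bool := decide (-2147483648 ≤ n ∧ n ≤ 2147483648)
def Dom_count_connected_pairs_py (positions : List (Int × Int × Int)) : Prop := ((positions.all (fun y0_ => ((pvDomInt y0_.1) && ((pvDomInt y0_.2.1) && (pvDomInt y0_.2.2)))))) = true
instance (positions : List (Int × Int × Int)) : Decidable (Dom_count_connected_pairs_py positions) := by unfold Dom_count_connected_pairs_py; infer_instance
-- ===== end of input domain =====

-- B replaces A's O(n^2) all-pairs scan by a position→count hash with two neighbour
-- lookups per cell (objective: faster, asymptotic). Return-value equivalence only.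

-- ===== PORT A =====
-- the nested 'for i, cell_id1 in enumerate(cell_ids): for cell_id2 in cell_ids[i+1:]'
-- as the obvious structural recursion (at step i the inner list IS the tail);
-- positions[cell_id] is d.getD … (0,0): the key is always present, so the default is unreachable
def pyPairLoop (d : PySem.Dict Int (Int × Int)) : List Int → Int → Int
  | [], acc => acc
  | k1 :: rest, acc =>
      let pos1 := d.getD k1 (0, 0)
      let acc' := rest.foldl (fun acc k2 =>
        let pos2 := d.getD k2 (0, 0)
        if (pos1.1 - pos2.1).natAbs + (pos1.2 - pos2.2).natAbs = 1 then acc + 1 else acc) acc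
      pyPairLoop d rest acc'

def count_connected_pairs_py (positions : List (Int × Int × Int)) : Int :=
  let d := PySem.Dict.ofList positions
  if d.size ≤ 1 then 0
  else pyPairLoop d d.keys 0

-- ===== PORT B =====
def count_connected_pairs_py_alt (positions : List (Int × Int × Int)) : Int :=
  let d := PySem.Dict.ofList positions
  let occ := d.values.foldl (fun o p => o.insert p (o.getD p 0 + 1))
    (PySem.Dict.empty : PySem.Dict (Int × Int) Int)
  d.values.foldl (fun t p =>
    t + (occ.getD (p.1 + 1, p.2) 0 + occ.getD (p.1, p.2 + 1) 0)) 0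

-- ===== PRECONDITION & SPEC =====
def Spec_count_connected_pairs_py (positions : List (Int × Int × Int)) (out : Int) : Prop := out = count_connected_pairs_py_alt positions
instance (positions : List (Int × Int × Int)) (out : Int) : Decidable (Spec_count_connected_pairs_py positions out) := by unfold Spec_count_connected_pairs_py; infer_instance

-- ===== CLAIM (what is proved, stated in full; the proofs are below) =====
def Claim_equal_count_connected_pairs_py : Prop := ∀ (positions : List (Int × Int × Int)), Dom_count_connected_pairs_py positions → Spec_count_connected_pairs_py positions (count_connected_pairs_py positions)

-- ===== LEMMAS AND PROOFS =====

-- A's answer on the value list: pairs within each tail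
def pairsA : List (Int × Int) → Int
  | [] => 0
  | p :: r => (r.countP (fun q => (p.1 - q.1).natAbs + (p.2 - q.2).natAbs = 1) : Int) + pairsA r

-- B's answer: per-cell neighbour counts of vs, counted against the list ws
def nbrT (ws : List (Int × Int)) (vs : List (Int × Int)) : Int :=
  (vs.map (fun p => ((ws.count (p.1 + 1, p.2) : Int) + (ws.count (p.1, p.2 + 1) : Int)))).sum

-- 0/1 indicator, to push all the cons-case bookkeeping into linear arithmetic
def indI (P : Prop) [Decidable P] : Int := if P then 1 else 0

lemma count_cons_int (a q : Int × Int) (l : List (Int × Int)) :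
    (((q :: l).count a : Int)) = (l.count a : Int) + indI (q = a) := by
  by_cases h : a = q
  · simp [indI, h]
  · simp [indI, Ne.symm h]

lemma countP_cons_int (p : Int × Int → Bool) (q : Int × Int) (l : List (Int × Int)) :
    (((q :: l).countP p : Int)) = (l.countP p : Int) + indI (p q = true) := by
  by_cases h : p q = true <;> simp [indI, h]

-- pointwise: a Manhattan-distance-1 pair is matched by exactly one of the four unit offsets
lemma adj_split (v q : Int × Int) :
    indI ((v.1 - q.1).natAbs + (v.2 - q.2).natAbs = 1)
      = indI (q = (v.1 + 1, v.2)) + indI (q = (v.1, v.2 + 1))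
        + indI (v = (q.1 + 1, q.2)) + indI (v = (q.1, q.2 + 1)) := by
  unfold indI
  simp only [Prod.ext_iff]
  split_ifs <;> omega

lemma indI_self_right (v : Int × Int) : indI (v = (v.1 + 1, v.2)) = 0 := by
  simp only [indI, Prod.ext_iff]; split_ifs <;> omega

lemma indI_self_up (v : Int × Int) : indI (v = (v.1, v.2 + 1)) = 0 := by
  simp only [indI, Prod.ext_iff]; split_ifs <;> omega

lemma countP_adj (v : Int × Int) (vs : List (Int × Int)) :
    (vs.countP (fun q => (v.1 - q.1).natAbs + (v.2 - q.2).natAbs = 1) : Int)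
      = (vs.count (v.1 + 1, v.2) : Int) + (vs.count (v.1, v.2 + 1) : Int)
        + (vs.countP (fun q => v = (q.1 + 1, q.2)) : Int)
        + (vs.countP (fun q => v = (q.1, q.2 + 1)) : Int) := by
  induction vs with
  | nil => simp
  | cons q vs ih =>
      rw [countP_cons_int, countP_cons_int, countP_cons_int, count_cons_int, count_cons_int]
      simp only [decide_eq_true_eq]
      have h := adj_split v q
      linarith [h, ih]

lemma nbrT_cons_left (v : Int × Int) (ws vs : List (Int × Int)) :
    nbrT (v :: ws) vs = nbrT ws vs
      + (vs.countP (fun q => v = (q.1 + 1, q.2)) : Int)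
      + (vs.countP (fun q => v = (q.1, q.2 + 1)) : Int) := by
  induction vs with
  | nil => simp [nbrT]
  | cons q vs ih =>
      simp only [nbrT, List.map_cons, List.sum_cons] at ih ⊢
      rw [countP_cons_int, countP_cons_int, count_cons_int, count_cons_int]
      simp only [decide_eq_true_eq]
      linarith [ih]

lemma pairsA_eq_nbrT (vs : List (Int × Int)) : pairsA vs = nbrT vs vs := by
  induction vs with
  | nil => simp [pairsA, nbrT]
  | cons v vs ih =>
      have hA := countP_adj v vs
      have hL := nbrT_cons_left v vs vs
      have h1 := indI_self_right v
      have h2 := indI_self_up v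
      simp only [pairsA, nbrT, List.map_cons, List.sum_cons] at ih hL ⊢
      rw [count_cons_int, count_cons_int, hL]
      linarith [hA, ih]

-- A-side bridge: the nested key loop computes pairsA of the value list
lemma inner_loop_eq (d : PySem.Dict Int (Int × Int)) (pos1 : Int × Int)
    (l : List (Int × (Int × Int))) (acc : Int)
    (h : ∀ p ∈ l, d.getD p.1 (0, 0) = p.2) :
    (l.map Prod.fst).foldl (fun acc k2 =>
        let pos2 := d.getD k2 (0, 0)
        if (pos1.1 - pos2.1).natAbs + (pos1.2 - pos2.2).natAbs = 1 then acc + 1 else acc) acc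
      = acc + ((l.map Prod.snd).countP
          (fun q => (pos1.1 - q.1).natAbs + (pos1.2 - q.2).natAbs = 1) : Int) := by
  induction l generalizing acc with
  | nil => simp
  | cons p l ih =>
      simp only [List.map_cons, List.foldl_cons]
      rw [h p (List.mem_cons_self)]
      rw [ih _ (fun q hq => h q (List.mem_cons_of_mem _ hq)), countP_cons_int]
      simp only [decide_eq_true_eq, indI]
      split_ifs <;> ring

lemma pyPairLoop_eq (d : PySem.Dict Int (Int × Int))
    (l : List (Int × (Int × Int))) (acc : Int)
    (h : ∀ p ∈ l, d.getD p.1 (0, 0) = p.2) :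
    pyPairLoop d (l.map Prod.fst) acc = acc + pairsA (l.map Prod.snd) := by
  induction l generalizing acc with
  | nil => simp [pyPairLoop, pairsA]
  | cons p l ih =>
      simp only [List.map_cons, pyPairLoop, pairsA]
      rw [h p (List.mem_cons_self),
        inner_loop_eq d p.2 l acc (fun q hq => h q (List.mem_cons_of_mem _ hq)),
        ih _ (fun q hq => h q (List.mem_cons_of_mem _ hq))]
      ring

-- B-side bridge: the two folds compute nbrT of the value list over itself
lemma alt_eq_nbrT (positions : List (Int × Int × Int)) :
    count_connected_pairs_py_alt positions
      = nbrT (PySem.Dict.ofList positions).values (PySem.Dict.ofList positions).values := by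
  unfold count_connected_pairs_py_alt
  dsimp only
  rw [PySem.Dict.foldl_insert_getD_add_one_eq_counter]
  simp only [PySem.Dict.getD_counter]
  generalize (PySem.Dict.ofList positions).values = vs
  rw [show (fun (t : Int) (p : Int × Int) =>
        t + ((vs.count (p.1 + 1, p.2) : Int) + (vs.count (p.1, p.2 + 1) : Int)))
      = (fun t p => t + (fun (p : Int × Int) =>
        ((vs.count (p.1 + 1, p.2) : Int) + (vs.count (p.1, p.2 + 1) : Int))) p) from rfl,
    PySem.List.foldl_add]
  simp [nbrT]

-- ===== VERDICT (by name: the statement is the Claim_ definition above) =====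
theorem count_connected_pairs_py_spec : Claim_equal_count_connected_pairs_py := by
  intro positions _
  unfold Spec_count_connected_pairs_py
  rw [alt_eq_nbrT, ← pairsA_eq_nbrT]
  unfold count_connected_pairs_py
  dsimp only
  have hnodup : (PySem.Dict.ofList positions).keys.Nodup :=
    PySem.Dict.nodup_keys_ofList positions
  set d := PySem.Dict.ofList positions with hd
  have hkeys : d.keys = d.items.map Prod.fst := rfl
  have hvals : d.values = d.items.map Prod.snd := rfl
  have hlook : ∀ p ∈ d.items, d.getD p.1 (0, 0) = p.2 := by
    intro p hp
    exact PySem.Dict.getD_of_mem_items d (by simpa using hp) hnodup (0, 0)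
  by_cases hs : d.size ≤ 1
  · simp only [hs, if_true]
    have hlen : d.items.length ≤ 1 := hs
    rw [hvals]
    match hitems : d.items, hlen with
    | [], _ => simp [pairsA]
    | [p], _ => simp [pairsA]
  · simp only [hs, if_false]
    rw [hkeys, pyPairLoop_eq d d.items 0 hlook, hvals]
    ring
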